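-- pv_equiv track=rewrite | github.com/andyhoneycutt/advent-of-code | 2019/day08/main.py | get_layer_fewest_entry
-- ===== SOURCE A (Python) =====
-- def get_layer_count_entry(layer, entry):
--     return sum([h.count(entry) for h in layer])
--
-- def get_layer_fewest_entry(layers, entry=0):
--     counts = []
--     for layer in layers:
--         counts.append(get_layer_count_entry(layer, entry))
--     min_count = min(counts)
--     for i, c in enumerate(counts):
--         if c == min_count:
--             return i
-- ===== SOURCE B (Python) =====
-- def get_layer_fewest_entry(layers, entry=0):
--     best = None
--     for i, layer in enumerate(layers):
--         c = sum(h.count(entry) for h in layer)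
--         if best is None or c < best[1]:
--             best = (i, c)
--     return best[0]
-- ===== Notes on version B (the rewrite author's own statement) =====
-- stated objective: simpler
-- what changed: Replaced A's three phases (build a counts list, take min, rescan for the first index with that count) by one pass that folds an argmin (best index, best count) over the layers, updating only on a strictly smaller count to keep the first-occurrence tie-break.
-- outside the precondition, e.g. on get_layer_fewest_entry([], 0): A raises ValueError, B raises TypeError
import Mathlib
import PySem

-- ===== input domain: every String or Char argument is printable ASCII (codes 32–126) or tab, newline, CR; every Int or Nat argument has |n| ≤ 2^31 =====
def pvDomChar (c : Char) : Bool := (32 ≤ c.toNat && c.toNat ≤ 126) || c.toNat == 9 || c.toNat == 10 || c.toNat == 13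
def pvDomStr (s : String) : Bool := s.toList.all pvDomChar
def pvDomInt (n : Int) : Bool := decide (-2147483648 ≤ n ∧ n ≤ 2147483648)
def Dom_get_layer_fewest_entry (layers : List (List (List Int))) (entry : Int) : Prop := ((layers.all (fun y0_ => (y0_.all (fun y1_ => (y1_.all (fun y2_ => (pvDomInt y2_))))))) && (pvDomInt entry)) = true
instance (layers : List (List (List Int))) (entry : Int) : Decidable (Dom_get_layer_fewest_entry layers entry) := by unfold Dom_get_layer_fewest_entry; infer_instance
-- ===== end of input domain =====

-- B replaces A's three phases (counts list, min, rescan for the first matching index)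
-- by a single argmin fold over the layers; same first-occurrence tie-break.

-- ===== PORT A =====
-- sum([h.count(entry) for h in layer])
def get_layer_count_entry (layer : List (List Int)) (entry : Int) : Int :=
  (layer.map (fun h => (PySem.List.count h entry : Int))).sum

-- 'for i, c in enumerate(counts): if c == min_count: return i' (0 if no match: unreachable, min_count ∈ counts)
def pvAScan : List (Int × Int) → Int → Int
  | [], _ => 0
  | (i, c) :: rest, m => if c = m then i else pvAScan rest m

def get_layer_fewest_entry (layers : List (List (List Int))) (entry : Int) : Int :=
  let counts := layers.foldl (fun acc layer => acc ++ [get_layer_count_entry layer entry]) []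
  -- min(counts): none = ValueError on empty counts, excluded by Pre_ (0 is a dummy there)
  let min_count := (PySem.List.min? counts (fun c => c)).getD 0
  pvAScan (PySem.List.enumerate counts 0) min_count

-- ===== PORT B =====
-- the 'for i, layer in enumerate(layers)' loop carrying best = None | (best_i, best_c)
def pvBLoop (entry : Int) : List (List (List Int)) → Int → Option (Int × Int) → Option (Int × Int)
  | [], _, best => best
  | layer :: rest, i, best =>
      let c := (layer.map (fun h => (PySem.List.count h entry : Int))).sum
      let best' :=
        match best with
        | none => some (i, c)
        | some (bi, bc) => if c < bc then some (i, c) else some (bi, bc)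
      pvBLoop entry rest (i + 1) best'

def get_layer_fewest_entry_alt (layers : List (List (List Int))) (entry : Int) : Int :=
  match pvBLoop entry layers 0 none with
  | some (bi, _) => bi
  | none => 0   -- best[0] raises TypeError on empty layers: excluded by Pre_, 0 is a dummy

-- ===== PRECONDITION & SPEC =====
-- On layers = [] A raises ValueError (min of empty list) and B raises TypeError; excluded.
def Pre_get_layer_fewest_entry (layers : List (List (List Int))) (entry : Int) : Prop := layers ≠ []
instance (layers : List (List (List Int))) (entry : Int) : Decidable (Pre_get_layer_fewest_entry layers entry) := by unfold Pre_get_layer_fewest_entry; infer_instance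
def pvWitness_get_layer_fewest_entry : List (List (List Int)) × Int := ([[[0, 1]], [[1]]], 0)

def Spec_get_layer_fewest_entry (layers : List (List (List Int))) (entry : Int) (out : Int) : Prop := out = get_layer_fewest_entry_alt layers entry
instance (layers : List (List (List Int))) (entry : Int) (out : Int) : Decidable (Spec_get_layer_fewest_entry layers entry out) := by unfold Spec_get_layer_fewest_entry; infer_instance

-- ===== CLAIM (what is proved, stated in full; the proofs are below) =====
def Claim_equal_get_layer_fewest_entry : Prop := ∀ (layers : List (List (List Int))) (entry : Int), Dom_get_layer_fewest_entry layers entry → Pre_get_layer_fewest_entry layers entry → Spec_get_layer_fewest_entry layers entry (get_layer_fewest_entry layers entry)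

-- ===== LEMMAS AND PROOFS =====

-- reference argmin fold on the list of counts
def pvAmin : List Int → Int → Int × Int → Int × Int
  | [], _, b => b
  | c :: cs, i, b => if c < b.2 then pvAmin cs (i + 1) (i, c) else pvAmin cs (i + 1) b

theorem pvBLoop_eq_amin (entry : Int) (ls : List (List (List Int))) (i : Int) (b : Int × Int) :
    pvBLoop entry ls i (some b) =
      some (pvAmin (ls.map (fun l => (l.map (fun h => (PySem.List.count h entry : Int))).sum)) i b) := by
  induction ls generalizing i b with
  | nil => rfl
  | cons l rest ih =>
      simp only [pvBLoop, pvAmin, List.map_cons]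
      split <;> simp [ih]

theorem pvAmin_eq_scan (cs : List Int) (i bi bc : Int) :
    (pvAmin cs i (bi, bc)).1 =
      if cs.foldl min bc = bc then bi
      else pvAScan (PySem.List.enumerate cs i) (cs.foldl min bc) := by
  induction cs generalizing i bi bc with
  | nil => simp [pvAmin]
  | cons c cs ih =>
      simp only [pvAmin, List.foldl_cons, PySem.List.enumerate_cons]
      have hmle : cs.foldl min (min bc c) ≤ min bc c := (PySem.List.foldl_min_le cs (min bc c)).1
      by_cases h : c < bc
      · rw [if_pos h]
        have hbc : min bc c = c := by omega
        rw [hbc] at hmle ⊢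
        rw [ih]
        have hne : ¬ cs.foldl min c = bc := by omega
        rw [if_neg hne, pvAScan]
        by_cases hc : cs.foldl min c = c
        · rw [if_pos hc, if_pos hc.symm]
        · rw [if_neg hc, if_neg (fun h' => hc h'.symm)]
      · rw [if_neg h]
        have hbc : min bc c = bc := by omega
        rw [hbc] at hmle ⊢
        rw [ih]
        by_cases he : cs.foldl min bc = bc
        · rw [if_pos he, if_pos he]
        · rw [if_neg he, if_neg he, pvAScan,
            if_neg (by intro hceq; omega)]

theorem foldl_append_counts (layers : List (List (List Int))) (entry : Int) :
    layers.foldl (fun acc layer => acc ++ [get_layer_count_entry layer entry]) [] =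
      layers.map (fun l => get_layer_count_entry l entry) := by
  simpa using PySem.List.foldl_append_singleton_eq_map
    (l := layers) (f := fun l => get_layer_count_entry l entry) (acc := [])

-- ===== VERDICT (by name: the statement is the Claim_ definition above) =====
theorem get_layer_fewest_entry_spec : Claim_equal_get_layer_fewest_entry := by
  intro layers entry _ hpre
  unfold Spec_get_layer_fewest_entry get_layer_fewest_entry get_layer_fewest_entry_alt
  cases layers with
  | nil => exact absurd rfl hpre
  | cons l0 rest =>
      rw [foldl_append_counts]
      simp only [List.map_cons, get_layer_count_entry]
      rw [PySem.List.min?_id_cons]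
      simp only [Option.getD_some, PySem.List.enumerate_cons, pvAScan]
      rw [pvBLoop, pvBLoop_eq_amin, show (0:Int) + 1 = 1 from rfl]
      have hscan := pvAmin_eq_scan
        (rest.map (fun l => (l.map (fun h => (PySem.List.count h entry : Int))).sum)) 1 0
        ((l0.map (fun h => (PySem.List.count h entry : Int))).sum)
      rcases hp : pvAmin
        (rest.map (fun l => (l.map (fun h => (PySem.List.count h entry : Int))).sum)) 1
        (0, (l0.map (fun h => (PySem.List.count h entry : Int))).sum) with ⟨bi, bc⟩
      rw [hp] at hscan
      simp only at hscan
      rw [hp]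
      simp only []
      rw [hscan]
      simp only [PySem.List.count_eq]
      rcases eq_or_ne ((l0.map (fun h => (List.count entry h : Int))).sum)
        ((rest.map (fun l => (l.map (fun h => (List.count entry h : Int))).sum)).foldl min
          ((l0.map (fun h => (List.count entry h : Int))).sum)) with h | h
      · rw [if_pos h, if_pos h.symm]
      · rw [if_neg h, if_neg (Ne.symm h)]
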